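-- pv_equiv track=rewrite | github.com/luismsgomes/stringology | src/stringology/align.py | mismatches
-- ===== SOURCE A (Python) =====
-- def mismatches(s1, s2, context=0):
--     '''extract mismatched segments from aligned strings
--
--     >>> list(mismatches(*align('pharmacy', 'farmácia'), context=1))
--     [('pha', ' fa'), ('mac', 'mác'), ('c y', 'cia')]
--
--     >>> list(mismatches(*align('constitution', 'constituição'), context=1))
--     [('ution', 'uição')]
--
--     >>> list(mismatches(*align('idea', 'ideia'), context=1))
--     [('e a', 'eia')]
--
--     >>> list(mismatches(*align('instructed', 'instruído'), context=1))
--     [('ucted', 'u ído')]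
--
--     >>> list(mismatches(*align('concluded', 'concluído'), context=1))
--     [('uded', 'uído')]
--     '''
--     n = len(s1)
--     assert(len(s2) == n)
--     lct, rct = context, context if isinstance(context, int) else context
--     i = None
--     for j in range(n):
--         if s1[j] == s2[j]:
--             if i is not None:
--                 # report mismatch segment [i:j] with lct chars of left context
--                 # and rct chars of right context
--                 p, q = max(0, i-lct), min(j+rct, n)
--                 yield s1[p:q], s2[p:q]
--                 i = None
--         elif i is None:
--                 i = j
--     if i is not None:
--         p = max(i-lct, 0)
--         yield s1[p:], s2[p:]
-- ===== SOURCE B (Python) =====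
-- def mismatches(s1, s2, context=0):
--     n = len(s1)
--     assert len(s2) == n
--     bad = [a != b for a, b in zip(s1, s2)]
--     j = 0
--     while j < n:
--         if bad[j]:
--             k = j + 1
--             while k < n and bad[k]:
--                 k += 1
--             p = max(j - context, 0)
--             q = n if k == n else min(k + context, n)
--             yield s1[p:q], s2[p:q]
--             j = k
--         else:
--             j += 1
-- ===== Notes on version B (the rewrite author's own statement) =====
-- stated objective: alternative
-- what changed: Replaces A's single stateful pass with an Optional run-start sentinel by a two-phase decomposition: first build a boolean mismatch mask, then scan it collecting contiguous runs (j,k) and emit the context-padded slices per run.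
import Mathlib
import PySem

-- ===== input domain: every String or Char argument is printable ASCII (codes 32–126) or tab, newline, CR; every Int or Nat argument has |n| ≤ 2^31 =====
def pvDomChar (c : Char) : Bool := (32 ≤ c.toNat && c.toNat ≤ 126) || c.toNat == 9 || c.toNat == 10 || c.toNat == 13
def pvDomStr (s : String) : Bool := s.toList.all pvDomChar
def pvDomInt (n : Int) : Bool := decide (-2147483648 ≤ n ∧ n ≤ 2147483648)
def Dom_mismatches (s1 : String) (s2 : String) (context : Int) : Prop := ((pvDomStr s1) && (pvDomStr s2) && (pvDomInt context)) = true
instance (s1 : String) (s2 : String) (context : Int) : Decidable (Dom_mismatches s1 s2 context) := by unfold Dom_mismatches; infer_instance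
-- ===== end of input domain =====

-- B replaces A's single stateful pass (Optional run-start sentinel) by a two-phase scan: build a
-- boolean mismatch mask, then collect contiguous mismatch runs and emit their context-padded slices
-- (objective: alternative decomposition, same cost). Equivalence is about the return value
-- (A is a generator; it is compared as the list of yielded pairs).

-- ===== PORT A =====
-- A-side helper: the body of A's `for j in range(n)` loop, on state (i, yielded-so-far).
def mmStepA (c1 c2 : List Char) (lct rct n : Int)
    (st : Option Int × List (String × String)) (j : Int) :
    Option Int × List (String × String) :=
  if PySem.List.pyGet? c1 j == PySem.List.pyGet? c2 j then
    match st.1 with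
    | some i0 =>
      let p := max 0 (i0 - lct)
      let q := min (j + rct) n
      (none, st.2 ++ [(String.ofList (PySem.List.slice c1 (some p) (some q)),
                       String.ofList (PySem.List.slice c2 (some p) (some q)))])
    | none => (none, st.2)
  else
    match st.1 with
    | none => (some j, st.2)
    | some _ => (st.1, st.2)

-- A-side helper: the trailing `if i is not None: yield …` after the loop.
def mmFinA (c1 c2 : List Char) (lct : Int)
    (st : Option Int × List (String × String)) : List (String × String) :=
  match st.1 with
  | some i0 =>
    let p := max (i0 - lct) 0
    st.2 ++ [(String.ofList (PySem.List.slice c1 (some p) none),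
              String.ofList (PySem.List.slice c2 (some p) none))]
  | none => st.2

def mismatches (s1 : String) (s2 : String) (context : Int) : List (String × String) :=
  let c1 := s1.toList
  let c2 := s2.toList
  let n : Int := (c1.length : Int)
  -- assert len(s2) == n: raises AssertionError when lengths differ — excluded by Pre_mismatches
  -- lct, rct = context, context if isinstance(context, int) else context — both branches give context
  let lct := context
  let rct := context
  mmFinA c1 c2 lct ((PySem.List.pyRange 0 n 1).foldl (mmStepA c1 c2 lct rct n) (none, []))

-- ===== PORT B =====
-- B-side helper: the inner `while k < n and bad[k]: k += 1` scan.
def mmScan (bad : List Bool) (n : Nat) (k : Nat) : Nat :=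
  if h : k < n ∧ bad.getD k false = true then mmScan bad n (k + 1) else k
termination_by n - k
decreasing_by exact Nat.sub_succ_lt_self n k h.1

theorem le_mmScan (bad : List Bool) (n k : Nat) : k ≤ mmScan bad n k := by
  fun_induction mmScan with
  | case1 k h ih => omega
  | case2 k h => exact le_refl k

-- B-side helper: the mismatch mask `bad = [a != b for a, b in zip(s1, s2)]`.
def badOf (c1 c2 : List Char) : List Bool := List.zipWith (fun a b => a != b) c1 c2

-- B-side helper: the outer `while j < n` loop collecting runs and emitting slices.
def mmGo (c1 c2 : List Char) (bad : List Bool) (context : Int) (n j : Nat) :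
    List (String × String) :=
  if hj : j < n then
    if bad.getD j false then
      let k := mmScan bad n (j + 1)
      let p : Int := max ((j : Int) - context) 0
      let q : Int := if k = n then (n : Int) else min ((k : Int) + context) (n : Int)
      (String.ofList (PySem.List.slice c1 (some p) (some q)),
       String.ofList (PySem.List.slice c2 (some p) (some q))) :: mmGo c1 c2 bad context n k
    else mmGo c1 c2 bad context n (j + 1)
  else []
termination_by n - j
decreasing_by
  · exact Nat.sub_lt_sub_left hj (Nat.lt_of_lt_of_le (Nat.lt_succ_self j) (le_mmScan bad n (j + 1)))
  · exact Nat.sub_succ_lt_self n j hj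

def mismatches_alt (s1 : String) (s2 : String) (context : Int) : List (String × String) :=
  let c1 := s1.toList
  let c2 := s2.toList
  let n := c1.length
  -- assert len(s2) == n: raises when lengths differ — excluded by Pre_mismatches
  mmGo c1 c2 (badOf c1 c2) context n 0

-- ===== PRECONDITION & SPEC =====
-- A's `assert len(s2) == n` raises AssertionError when the strings have different lengths;
-- exactly those inputs are excluded.
def Pre_mismatches (s1 : String) (s2 : String) (context : Int) : Prop :=
  s1.toList.length = s2.toList.length
instance (s1 : String) (s2 : String) (context : Int) : Decidable (Pre_mismatches s1 s2 context) := by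
  unfold Pre_mismatches; infer_instance

def pvWitness_mismatches : String × String × Int := ("pharmacy", "farmacia", 1)

def Spec_mismatches (s1 : String) (s2 : String) (context : Int) (out : List (String × String)) : Prop := out = mismatches_alt s1 s2 context
instance (s1 : String) (s2 : String) (context : Int) (out : List (String × String)) : Decidable (Spec_mismatches s1 s2 context out) := by unfold Spec_mismatches; infer_instance

-- ===== CLAIM (what is proved, stated in full; the proofs are below) =====
def Claim_equal_mismatches : Prop := ∀ (s1 : String) (s2 : String) (context : Int), Dom_mismatches s1 s2 context → Pre_mismatches s1 s2 context → Spec_mismatches s1 s2 context (mismatches s1 s2 context)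

-- ===== LEMMAS AND PROOFS =====

theorem pySlice_to_len (l : List Char) (p q : Int) (hq : q = (l.length : Int)) :
    PySem.List.slice l (some p) (some q) = PySem.List.slice l (some p) none := by
  subst hq; simp [PySem.List.slice]

theorem mmMain (c1 c2 : List Char) (ctx : Int) (hlen : c2.length = c1.length) :
    ∀ d j, j ≤ c1.length → c1.length - j = d →
      (∀ acc, mmFinA c1 c2 ctx
          ((PySem.List.pyRange (j : Int) (c1.length : Int) 1).foldl
            (mmStepA c1 c2 ctx ctx (c1.length : Int)) (none, acc))
        = acc ++ mmGo c1 c2 (badOf c1 c2) ctx c1.length j) ∧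
      (∀ i0 acc, mmFinA c1 c2 ctx
          ((PySem.List.pyRange (j : Int) (c1.length : Int) 1).foldl
            (mmStepA c1 c2 ctx ctx (c1.length : Int)) (some i0, acc))
        = acc ++
          (let k := mmScan (badOf c1 c2) c1.length j
           let p : Int := max 0 (i0 - ctx)
           let q : Option Int := if k = c1.length then none
                                 else some (min ((k : Int) + ctx) ((c1.length : Int)))
           (String.ofList (PySem.List.slice c1 (some p) q),
            String.ofList (PySem.List.slice c2 (some p) q)) ::
              mmGo c1 c2 (badOf c1 c2) ctx c1.length k)) := by
  intro d
  induction d using Nat.strong_induction_on with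
  | _ d ih =>
    intro j hj hd
    by_cases hjn : j < c1.length
    · -- one more loop iteration
      have hcons : PySem.List.pyRange (j : Int) (c1.length : Int) 1
          = (j : Int) :: PySem.List.pyRange ((j : Int) + 1) (c1.length : Int) 1 :=
        PySem.List.pyRange_one_cons (by exact_mod_cast hjn)
      have hsucc : ((j : Int) + 1) = ((j + 1 : Nat) : Int) := by push_cast; ring
      have hjn2 : j < c2.length := by omega
      have hbadlen : (badOf c1 c2).length = c1.length := by
        simp [badOf, hlen]
      have hbad : (badOf c1 c2).getD j false = (c1[j] != c2[j]) := by
        rw [List.getD_eq_getElem _ _ (by omega)]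
        simp [badOf]
      have hbad' : (badOf c1 c2)[j]?.getD false = (c1[j] != c2[j]) := by
        rw [← List.getD_eq_getElem?_getD]; exact hbad
      have hg : (PySem.List.pyGet? c1 ((j : Nat) : Int) == PySem.List.pyGet? c2 ((j : Nat) : Int))
          = (c1[j] == c2[j]) := by
        rw [PySem.List.pyGet?_natCast, PySem.List.pyGet?_natCast]
        simp [hjn, hjn2]
      have ihp := ih (d - 1) (by omega) (j + 1) (by omega) (by omega)
      by_cases hc : c1[j] = c2[j]
      · -- matching position: bad[j] = false
        have hbf : (badOf c1 c2).getD j false = false := by rw [hbad]; simp [hc]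
        have hbf' : (badOf c1 c2)[j]?.getD false = false := by rw [hbad']; simp [hc]
        have hbfp : ¬ ((badOf c1 c2).getD j false = true) := by rw [hbf]; simp
        constructor
        · intro acc
          rw [hcons]
          simp only [List.foldl_cons]
          rw [show mmStepA c1 c2 ctx ctx (c1.length : Int) (none, acc) (j : Int) = (none, acc) by
            simp only [mmStepA]; rw [hg]; simp [hc]]
          rw [hsucc, ihp.1 acc]
          congr 1
          conv_rhs => rw [mmGo]
          rw [dif_pos hjn, if_neg hbfp]
        · intro i0 acc
          rw [hcons]
          simp only [List.foldl_cons]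
          have hk : mmScan (badOf c1 c2) c1.length j = j := by
            rw [mmScan]; simp [hbf']
          rw [show mmStepA c1 c2 ctx ctx (c1.length : Int) (some i0, acc) (j : Int)
              = (none, acc ++ [(String.ofList (PySem.List.slice c1 (some (max 0 (i0 - ctx)))
                    (some (min ((j : Int) + ctx) (c1.length : Int)))),
                  String.ofList (PySem.List.slice c2 (some (max 0 (i0 - ctx)))
                    (some (min ((j : Int) + ctx) (c1.length : Int)))))]) by
            simp only [mmStepA]; rw [hg]; simp [hc]]
          rw [hsucc, ihp.1 _]
          simp only [hk, List.append_assoc, List.cons_append, List.nil_append,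
            if_neg (by omega : ¬ j = c1.length)]
          congr 2
          conv_rhs => rw [mmGo]
          rw [dif_pos hjn, if_neg hbfp]
      · -- mismatching position: bad[j] = true
        have hbt : (badOf c1 c2).getD j false = true := by rw [hbad]; simp [hc]
        have hbt' : (badOf c1 c2)[j]?.getD false = true := by rw [hbad']; simp [hc]
        have hscan : mmScan (badOf c1 c2) c1.length j = mmScan (badOf c1 c2) c1.length (j + 1) := by
          rw [mmScan]; simp [hjn, hbt']
        constructor
        · intro acc
          rw [hcons]
          simp only [List.foldl_cons]
          rw [show mmStepA c1 c2 ctx ctx (c1.length : Int) (none, acc) (j : Int)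
              = (some (j : Int), acc) by simp only [mmStepA]; rw [hg]; simp [hc]]
          rw [hsucc, ihp.2 (j : Int) acc]
          congr 1
          conv_rhs => rw [mmGo]
          rw [dif_pos hjn, if_pos hbt]
          rw [max_comm 0 ((j : Int) - ctx)]
          dsimp only
          split_ifs with hk
          · rw [show PySem.List.slice c1 (some (max ((j : Int) - ctx) 0)) (some ((c1.length : Int)))
                = PySem.List.slice c1 (some (max ((j : Int) - ctx) 0)) none from
                pySlice_to_len c1 _ _ rfl,
              show PySem.List.slice c2 (some (max ((j : Int) - ctx) 0)) (some ((c1.length : Int)))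
                = PySem.List.slice c2 (some (max ((j : Int) - ctx) 0)) none from
                pySlice_to_len c2 _ _ (by exact_mod_cast hlen.symm)]
          · rfl
        · intro i0 acc
          rw [hcons]
          simp only [List.foldl_cons]
          rw [show mmStepA c1 c2 ctx ctx (c1.length : Int) (some i0, acc) (j : Int)
              = (some i0, acc) by simp only [mmStepA]; rw [hg]; simp [hc]]
          rw [hsucc, ihp.2 i0 acc]
          rw [hscan]
    · -- j = c1.length : loop finished
      have hje : j = c1.length := by omega
      have hnil : PySem.List.pyRange (j : Int) (c1.length : Int) 1 = [] := by
        subst hje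
        simp [pysem]
      constructor
      · intro acc
        rw [hnil]
        simp only [List.foldl_nil]
        rw [mmGo]
        simp [mmFinA, hje]
      · intro i0 acc
        rw [hnil]
        simp only [List.foldl_nil]
        simp only [hje]
        have hk : mmScan (badOf c1 c2) c1.length c1.length = c1.length := by
          rw [mmScan]; simp
        rw [hk, if_pos rfl, mmGo, dif_neg (lt_irrefl _)]
        simp [mmFinA, max_comm (i0 - ctx) 0]

-- ===== VERDICT (by name: the statement is the Claim_ definition above) =====
theorem mismatches_spec : Claim_equal_mismatches := by
  intro s1 s2 context _hdom hpre
  unfold Spec_mismatches mismatches mismatches_alt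
  have h := (mmMain s1.toList s2.toList context hpre.symm (s1.toList.length) 0 (Nat.zero_le _) (by omega)).1 []
  simpa using h
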